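-- pv_equiv track=rewrite | github.com/iamaber/medical-guideline-rag | src/services/vector_search.py | _ensure_result_diversity
-- ===== SOURCE A (Python) =====
-- from typing import List, Dict, Optional
--
-- def _ensure_result_diversity(results: List[Dict]) -> List[Dict]:
--     """Ensure diversity in search results."""
--     diverse_results = []
--     seen_sources = set()
--
--     # First pass: one result per unique source
--     for result in results:
--         source = result.get("source", "")
--         if source not in seen_sources:
--             diverse_results.append(result)
--             seen_sources.add(source)
--
--     # Second pass: add remaining high-scoring results
--     for result in results:
--         if result not in diverse_results and len(diverse_results) < len(results):
--             diverse_results.append(result)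
--
--     return diverse_results
-- ===== SOURCE B (Python) =====
-- def _ensure_result_diversity(results):
--     """Ensure diversity in search results: one pass, bucketing into first-per-source and the deduplicated rest."""
--     seen_sources = set()
--     firsts = []
--     rest = []
--     for result in results:
--         source = result.get("source", "")
--         if source not in seen_sources:
--             seen_sources.add(source)
--             firsts.append(result)
--         elif result not in firsts and result not in rest:
--             rest.append(result)
--     return firsts + rest
-- ===== Notes on version B (the rewrite author's own statement) =====
-- stated objective: simpler
-- what changed: B makes a single pass that buckets each result into 'first per source' or a deduplicated 'rest' list and returns firsts + rest, instead of A's two separate passes over results, and drops A's length cap, which is unreachable because the output never exceeds len(results).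
import Mathlib
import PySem

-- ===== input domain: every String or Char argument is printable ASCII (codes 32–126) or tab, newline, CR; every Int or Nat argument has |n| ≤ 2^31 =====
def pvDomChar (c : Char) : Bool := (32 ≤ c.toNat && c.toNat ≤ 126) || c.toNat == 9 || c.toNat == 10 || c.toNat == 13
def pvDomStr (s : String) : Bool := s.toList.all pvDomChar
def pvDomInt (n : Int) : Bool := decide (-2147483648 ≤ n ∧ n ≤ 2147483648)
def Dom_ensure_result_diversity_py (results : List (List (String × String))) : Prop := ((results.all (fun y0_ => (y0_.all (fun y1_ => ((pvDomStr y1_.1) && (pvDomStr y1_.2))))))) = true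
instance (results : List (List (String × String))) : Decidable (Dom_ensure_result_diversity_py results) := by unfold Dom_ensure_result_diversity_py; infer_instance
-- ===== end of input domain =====

-- B makes one pass with two buckets (first-per-source, then deduplicated rest) instead of A's two passes,
-- and drops A's length cap (provably unreachable); equal RETURN value, no argument mutation in either program.

-- Shared Python-semantics helpers (a result is a dict[str,str], ported as an association list):
-- Python's d.get("source", "")
def pvSrc (r : List (String × String)) : String := (PySem.Dict.mk r).getD "source" ""
-- Python's '==' on two dicts: same keys and same value at every key (order-insensitive)
def pvDictEq (a b : List (String × String)) : Bool :=
  ((PySem.Dict.mk a).keys.all (fun k => (PySem.Dict.mk a).get? k == (PySem.Dict.mk b).get? k)) &&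
  ((PySem.Dict.mk b).keys.all (fun k => (PySem.Dict.mk a).get? k == (PySem.Dict.mk b).get? k))
-- Python's 'r in l' for a list of dicts
def pvInDicts (l : List (List (String × String))) (r : List (String × String)) : Bool :=
  l.any (fun x => pvDictEq x r)

-- ===== PORT A =====
-- first pass: one result per unique source
def pvStepA1 (st : List (List (String × String)) × PySem.Set String) (result : List (String × String)) :
    List (List (String × String)) × PySem.Set String :=
  let source := pvSrc result
  if source ∉ st.2 then (st.1 ++ [result], PySem.Set.add st.2 source) else st
-- second pass: add remaining results not yet present, under the length cap
def pvStepA2 (n : Nat) (dr : List (List (String × String))) (result : List (String × String)) :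
    List (List (String × String)) :=
  if pvInDicts dr result = false ∧ dr.length < n then dr ++ [result] else dr

def ensure_result_diversity_py (results : List (List (String × String))) : List (List (String × String)) :=
  let first := results.foldl pvStepA1 ([], PySem.Set.empty)
  results.foldl (pvStepA2 results.length) first.1

-- ===== PORT B =====
-- one pass: bucket into firsts (new source) and rest (seen source, not yet present in either bucket)
def pvStepB (st : PySem.Set String × List (List (String × String)) × List (List (String × String)))
    (result : List (String × String)) :
    PySem.Set String × List (List (String × String)) × List (List (String × String)) :=
  let source := pvSrc result
  if source ∉ st.1 then (PySem.Set.add st.1 source, st.2.1 ++ [result], st.2.2)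
  else if pvInDicts st.2.1 result = false ∧ pvInDicts st.2.2 result = false then
    (st.1, st.2.1, st.2.2 ++ [result])
  else st

def ensure_result_diversity_py_alt (results : List (List (String × String))) : List (List (String × String)) :=
  let st := results.foldl pvStepB (PySem.Set.empty, [], [])
  st.2.1 ++ st.2.2

-- ===== PRECONDITION & SPEC =====
def Spec_ensure_result_diversity_py (results : List (List (String × String))) (out : List (List (String × String))) : Prop := out = ensure_result_diversity_py_alt results
instance (results : List (List (String × String))) (out : List (List (String × String))) : Decidable (Spec_ensure_result_diversity_py results out) := by unfold Spec_ensure_result_diversity_py; infer_instance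

-- ===== CLAIM (what is proved, stated in full; the proofs are below) =====
def Claim_equal_ensure_result_diversity_py : Prop := ∀ (results : List (List (String × String))), Dom_ensure_result_diversity_py results → Spec_ensure_result_diversity_py results (ensure_result_diversity_py results)

-- ===== LEMMAS AND PROOFS =====

lemma pvDictEq_iff (a b : List (String × String)) :
    pvDictEq a b = true ↔ ∀ k, (PySem.Dict.mk a).get? k = (PySem.Dict.mk b).get? k := by
  constructor
  · intro h k
    simp only [pvDictEq, Bool.and_eq_true, List.all_eq_true, beq_iff_eq] at h
    by_cases ha : k ∈ (PySem.Dict.mk a).keys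
    · exact h.1 k ha
    · by_cases hb : k ∈ (PySem.Dict.mk b).keys
      · exact h.2 k hb
      · rw [(PySem.Dict.get?_eq_none_iff_not_mem_keys _ _).2 ha, (PySem.Dict.get?_eq_none_iff_not_mem_keys _ _).2 hb]
  · intro h
    simp [pvDictEq, List.all_eq_true, h]
lemma pvDictEq_refl (a : List (String × String)) : pvDictEq a a = true :=
  (pvDictEq_iff a a).2 (fun _ => rfl)
lemma pvDictEq_symm {a b : List (String × String)} (h : pvDictEq a b = true) : pvDictEq b a = true :=
  (pvDictEq_iff b a).2 (fun k => ((pvDictEq_iff a b).1 h k).symm)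
lemma pvDictEq_trans {a b c : List (String × String)} (h1 : pvDictEq a b = true)
    (h2 : pvDictEq b c = true) : pvDictEq a c = true :=
  (pvDictEq_iff a c).2 (fun k => ((pvDictEq_iff a b).1 h1 k).trans ((pvDictEq_iff b c).1 h2 k))
lemma pvDictEq_src {a b : List (String × String)} (h : pvDictEq a b = true) : pvSrc a = pvSrc b := by
  unfold pvSrc
  rw [PySem.Dict.getD_eq_get?_getD, PySem.Dict.getD_eq_get?_getD, (pvDictEq_iff a b).1 h "source"]
lemma pv_len_le : ∀ (l R : List (List (String × String))),
    (∀ a ∈ l, ∃ b ∈ R, pvDictEq a b = true) →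
    l.Pairwise (fun a b => pvDictEq a b = false) → l.length ≤ R.length := by
  intro l
  induction l with
  | nil => simp
  | cons a tl ih =>
    intro R hin hpw
    obtain ⟨b, hbR, hab⟩ := hin a (List.mem_cons_self ..)
    rw [List.pairwise_cons] at hpw
    have htl : ∀ c ∈ tl, ∃ b' ∈ R.erase b, pvDictEq c b' = true := by
      intro c hc
      obtain ⟨b', hb', hcb'⟩ := hin c (List.mem_cons_of_mem _ hc)
      refine ⟨b', ?_, hcb'⟩
      have hne : b' ≠ b := by
        intro he; subst he
        have hac := pvDictEq_trans hab (pvDictEq_symm hcb')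
        have := hpw.1 c hc
        simp [this] at hac
      exact (List.mem_erase_of_ne hne).2 hb'
    have h1 := ih (R.erase b) htl hpw.2
    have h2 := List.length_erase_of_mem hbR
    have h3 : 0 < R.length := List.length_pos_of_mem hbR
    simp only [List.length_cons]
    omega
lemma pv_seen_add {f : List (List (String × String))} {seen : PySem.Set String}
    {r : List (String × String)}
    (h1 : ∀ s, s ∈ seen ↔ ∃ x ∈ f, pvSrc x = s) :
    ∀ s, s ∈ PySem.Set.add seen (pvSrc r) ↔ ∃ x ∈ f ++ [r], pvSrc x = s := by
  intro s
  rw [PySem.Set.mem_add]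
  simp only [List.mem_append, List.mem_singleton]
  constructor
  · rintro (hs | rfl)
    · obtain ⟨x, hx, hxs⟩ := (h1 s).1 hs; exact ⟨x, Or.inl hx, hxs⟩
    · exact ⟨r, Or.inr rfl, rfl⟩
  · rintro ⟨x, hx | rfl, hxs⟩
    · exact Or.inl ((h1 s).2 ⟨x, hx, hxs⟩)
    · exact Or.inr hxs.symm

lemma pv_nodup_add {f : List (List (String × String))} {seen : PySem.Set String}
    {r : List (String × String)}
    (h1 : ∀ s, s ∈ seen ↔ ∃ x ∈ f, pvSrc x = s) (h2 : (f.map pvSrc).Nodup)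
    (hs : pvSrc r ∉ seen) : ((f ++ [r]).map pvSrc).Nodup := by
  rw [List.map_append, List.nodup_append]
  refine ⟨h2, List.nodup_singleton _, ?_⟩
  intro s hsf
  simp only [List.mem_map] at hsf
  obtain ⟨x, hx, rfl⟩ := hsf
  simp only [List.map_cons, List.map_nil, List.mem_singleton, forall_eq]
  intro he
  exact hs ((h1 _).2 ⟨x, hx, he⟩)

lemma pv_firstpass : ∀ (l : List (List (String × String)))
    (f : List (List (String × String))) (seen : PySem.Set String),
    (∀ s, s ∈ seen ↔ ∃ x ∈ f, pvSrc x = s) → (f.map pvSrc).Nodup →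
    (∃ g, (l.foldl pvStepA1 (f, seen)).1 = f ++ g) ∧
    (∀ a ∈ (l.foldl pvStepA1 (f, seen)).1, pvSrc a ∈ seen → a ∈ f) ∧
    ((l.foldl pvStepA1 (f, seen)).1.map pvSrc).Nodup ∧
    (∀ a ∈ (l.foldl pvStepA1 (f, seen)).1, a ∈ f ∨ a ∈ l) := by
  intro l
  induction l with
  | nil =>
    intro f seen h1 h2
    exact ⟨⟨[], by simp⟩, fun a ha _ => ha, h2, fun a ha => Or.inl ha⟩
  | cons r tl ih =>
    intro f seen h1 h2
    by_cases hs : pvSrc r ∈ seen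
    · have hstep : pvStepA1 (f, seen) r = (f, seen) := by simp [pvStepA1, hs]
      simp only [List.foldl_cons, hstep]
      obtain ⟨hg, hS2, hS3, hS4⟩ := ih f seen h1 h2
      exact ⟨hg, hS2, hS3, fun a ha => (hS4 a ha).imp id (List.mem_cons_of_mem _)⟩
    · have hstep : pvStepA1 (f, seen) r = (f ++ [r], PySem.Set.add seen (pvSrc r)) := by
        simp [pvStepA1, hs]
      simp only [List.foldl_cons, hstep]
      obtain ⟨⟨g, hg⟩, hS2, hS3, hS4⟩ := ih (f ++ [r]) (PySem.Set.add seen (pvSrc r))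
        (pv_seen_add h1) (pv_nodup_add h1 h2 hs)
      refine ⟨⟨r :: g, by simp [hg]⟩, ?_, hS3, ?_⟩
      · intro a ha hasrc
        have := hS2 a ha (by rw [PySem.Set.mem_add]; exact Or.inl hasrc)
        rcases List.mem_append.1 this with h | h
        · exact h
        · simp only [List.mem_singleton] at h; subst h; exact absurd hasrc hs
      · intro a ha
        rcases hS4 a ha with h | h
        · rcases List.mem_append.1 h with h' | h'
          · exact Or.inl h'
          · simp only [List.mem_singleton] at h'; subst h'; exact Or.inr (List.mem_cons_self ..)
        · exact Or.inr (List.mem_cons_of_mem _ h)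
lemma pvInDicts_iff (l : List (List (String × String))) (r : List (String × String)) :
    pvInDicts l r = true ↔ ∃ x ∈ l, pvDictEq x r = true := by
  simp [pvInDicts, List.any_eq_true]
lemma pvInDicts_false_iff (l : List (List (String × String))) (r : List (String × String)) :
    pvInDicts l r = false ↔ ∀ x ∈ l, pvDictEq x r = false := by
  simp [pvInDicts, List.any_eq_false]
lemma pvInDicts_append (l1 l2 : List (List (String × String))) (r : List (String × String)) :
    pvInDicts (l1 ++ l2) r = (pvInDicts l1 r || pvInDicts l2 r) := by
  simp [pvInDicts, List.any_append]
lemma pvInDicts_of_mem {l : List (List (String × String))} {r : List (String × String)}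
    (h : r ∈ l) : pvInDicts l r = true :=
  (pvInDicts_iff l r).2 ⟨r, h, pvDictEq_refl r⟩

lemma pv_main (R : List (List (String × String))) : ∀ (l : List (List (String × String)))
    (f t : List (List (String × String))) (seen : PySem.Set String),
    (∀ s, s ∈ seen ↔ ∃ x ∈ f, pvSrc x = s) →
    (f.map pvSrc).Nodup →
    t.Pairwise (fun a b => pvDictEq a b = false) →
    (∀ a ∈ t, pvSrc a ∈ seen) →
    (∀ a ∈ t, ∀ x ∈ f, pvDictEq x a = false) →
    (∀ a ∈ t, ∃ b ∈ R, pvDictEq a b = true) →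
    (∀ a ∈ f, ∃ b ∈ R, pvDictEq a b = true) →
    (∀ a ∈ l, a ∈ R) →
    (l.foldl pvStepB (seen, f, t)).2.1 = (l.foldl pvStepA1 (f, seen)).1 ∧
    l.foldl (pvStepA2 R.length) ((l.foldl pvStepA1 (f, seen)).1 ++ t) =
      (l.foldl pvStepA1 (f, seen)).1 ++ (l.foldl pvStepB (seen, f, t)).2.2 := by
  intro l
  induction l with
  | nil => intro f t seen _ _ _ _ _ _ _ _; exact ⟨rfl, rfl⟩
  | cons r tl ih =>
    intro f t seen h1 h2 h3 h4 h5 h6 h7 h8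
    have hr : r ∈ R := h8 r (List.mem_cons_self ..)
    have htl : ∀ a ∈ tl, a ∈ R := fun a ha => h8 a (List.mem_cons_of_mem _ ha)
    by_cases hs : pvSrc r ∈ seen
    · have hA1 : pvStepA1 (f, seen) r = (f, seen) := by simp [pvStepA1, hs]
      obtain ⟨⟨g, hFg⟩, hS2, hS3, hS4⟩ := pv_firstpass tl f seen h1 h2
      have hFf : pvInDicts (tl.foldl pvStepA1 (f, seen)).1 r = pvInDicts f r := by
        cases hf : pvInDicts f r with
        | true =>
          obtain ⟨x, hx, he⟩ := (pvInDicts_iff f r).1 hf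
          exact (pvInDicts_iff _ r).2 ⟨x, by rw [hFg]; exact List.mem_append_left _ hx, he⟩
        | false =>
          rw [pvInDicts_false_iff] at hf ⊢
          intro x hx
          by_cases hxe : pvDictEq x r = true
          · have hxsrc : pvSrc x ∈ seen := by rw [pvDictEq_src hxe]; exact hs
            exact hf x (hS2 x hx hxsrc)
          · exact Bool.eq_false_iff.2 hxe
      have hpwF : (tl.foldl pvStepA1 (f, seen)).1.Pairwise (fun a b => pvDictEq a b = false) := by
        have hS3' : (tl.foldl pvStepA1 (f, seen)).1.Pairwise (fun a b => pvSrc a ≠ pvSrc b) := by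
          rw [List.Nodup, List.pairwise_map] at hS3; exact hS3
        refine hS3'.imp ?_
        intro a b hne
        cases he : pvDictEq a b with
        | true => exact absurd (pvDictEq_src he) hne
        | false => rfl
      by_cases hc : pvInDicts f r = false ∧ pvInDicts t r = false
      · have hB : pvStepB (seen, f, t) r = (seen, f, t ++ [r]) := by
          simp [pvStepB, hs, hc.1, hc.2]
        have hInFt : pvInDicts ((tl.foldl pvStepA1 (f, seen)).1 ++ t) r = false := by
          rw [pvInDicts_append, hFf, hc.1, hc.2]; rfl
        have h3' : (t ++ [r]).Pairwise (fun a b => pvDictEq a b = false) := by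
          rw [List.pairwise_append]
          refine ⟨h3, List.pairwise_singleton .., ?_⟩
          intro a hat b hbr
          simp only [List.mem_singleton] at hbr; rw [hbr]
          exact (pvInDicts_false_iff t r).1 hc.2 a hat
        have h5' : ∀ a ∈ t ++ [r], ∀ x ∈ f, pvDictEq x a = false := by
          intro a ha x hx
          rcases List.mem_append.1 ha with h | h
          · exact h5 a h x hx
          · simp only [List.mem_singleton] at h; rw [h]
            exact (pvInDicts_false_iff f r).1 hc.1 x hx
        have hall : ∀ a ∈ (tl.foldl pvStepA1 (f, seen)).1 ++ (t ++ [r]), ∃ b ∈ R, pvDictEq a b = true := by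
          intro a ha
          rcases List.mem_append.1 ha with haF | hat
          · rcases hS4 a haF with haf | hatl
            · exact h7 a haf
            · exact ⟨a, htl a hatl, pvDictEq_refl a⟩
          · rcases List.mem_append.1 hat with hat' | har
            · exact h6 a hat'
            · simp only [List.mem_singleton] at har; rw [har]; exact ⟨r, hr, pvDictEq_refl _⟩
        have hpwFt : ((tl.foldl pvStepA1 (f, seen)).1 ++ (t ++ [r])).Pairwise (fun a b => pvDictEq a b = false) := by
          rw [List.pairwise_append]
          refine ⟨hpwF, h3', ?_⟩
          intro a haF b hb
          have haf : pvDictEq a b = true → a ∈ f := by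
            intro he
            have hbs : pvSrc b ∈ seen := by
              rcases List.mem_append.1 hb with hbt | hbr
              · exact h4 b hbt
              · simp only [List.mem_singleton] at hbr; rw [hbr]; exact hs
            exact hS2 a haF (by rw [pvDictEq_src he]; exact hbs)
          cases he : pvDictEq a b with
          | false => rfl
          | true => exact absurd he (by simp [h5' b hb a (haf he)])
        have hlen : ((tl.foldl pvStepA1 (f, seen)).1 ++ t).length < R.length := by
          have hle := pv_len_le _ R hall hpwFt
          simp only [List.length_append, List.length_cons, List.length_nil] at hle ⊢
          omega
        have hA2 : pvStepA2 R.length ((tl.foldl pvStepA1 (f, seen)).1 ++ t) r =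
            (tl.foldl pvStepA1 (f, seen)).1 ++ (t ++ [r]) := by
          simp only [pvStepA2]
          rw [if_pos ⟨hInFt, hlen⟩, List.append_assoc]
        have h4' : ∀ a ∈ t ++ [r], pvSrc a ∈ seen := by
          intro a ha
          rcases List.mem_append.1 ha with h | h
          · exact h4 a h
          · simp only [List.mem_singleton] at h; rw [h]; exact hs
        have h6' : ∀ a ∈ t ++ [r], ∃ b ∈ R, pvDictEq a b = true := by
          intro a ha
          rcases List.mem_append.1 ha with h | h
          · exact h6 a h
          · simp only [List.mem_singleton] at h; rw [h]; exact ⟨r, hr, pvDictEq_refl _⟩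
        obtain ⟨ih1, ih2⟩ := ih f (t ++ [r]) seen h1 h2 h3' h4' h5' h6' h7 htl
        constructor
        · simp only [List.foldl_cons, hA1, hB]; exact ih1
        · simp only [List.foldl_cons, hA1, hB, hA2]; exact ih2
      · have hB : pvStepB (seen, f, t) r = (seen, f, t) := by
          simp [pvStepB, hs, hc]
        have hInFt : pvInDicts ((tl.foldl pvStepA1 (f, seen)).1 ++ t) r = true := by
          rw [pvInDicts_append, hFf]
          rcases not_and_or.1 hc with h | h
          · have hx : pvInDicts f r = true := by revert h; cases pvInDicts f r <;> simp
            simp [hx]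
          · have hx : pvInDicts t r = true := by revert h; cases pvInDicts t r <;> simp
            simp [hx]
        have hA2 : pvStepA2 R.length ((tl.foldl pvStepA1 (f, seen)).1 ++ t) r =
            (tl.foldl pvStepA1 (f, seen)).1 ++ t := by
          simp [pvStepA2, hInFt]
        obtain ⟨ih1, ih2⟩ := ih f t seen h1 h2 h3 h4 h5 h6 h7 htl
        constructor
        · simp only [List.foldl_cons, hA1, hB]; exact ih1
        · simp only [List.foldl_cons, hA1, hB, hA2]; exact ih2
    · have hA1 : pvStepA1 (f, seen) r = (f ++ [r], PySem.Set.add seen (pvSrc r)) := by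
        simp [pvStepA1, hs]
      have hB : pvStepB (seen, f, t) r = (PySem.Set.add seen (pvSrc r), f ++ [r], t) := by
        simp [pvStepB, hs]
      have h1' := pv_seen_add (r := r) h1
      have h2' := pv_nodup_add h1 h2 hs
      have h4' : ∀ a ∈ t, pvSrc a ∈ PySem.Set.add seen (pvSrc r) := by
        intro a ha; rw [PySem.Set.mem_add]; exact Or.inl (h4 a ha)
      have h5' : ∀ a ∈ t, ∀ x ∈ f ++ [r], pvDictEq x a = false := by
        intro a ha x hx
        rcases List.mem_append.1 hx with h | h
        · exact h5 a ha x h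
        · simp only [List.mem_singleton] at h; rw [h]
          cases he : pvDictEq r a with
          | false => rfl
          | true => exact absurd (by rw [pvDictEq_src he]; exact h4 a ha) hs
      have h7' : ∀ a ∈ f ++ [r], ∃ b ∈ R, pvDictEq a b = true := by
        intro a ha
        rcases List.mem_append.1 ha with h | h
        · exact h7 a h
        · simp only [List.mem_singleton] at h; rw [h]; exact ⟨r, hr, pvDictEq_refl _⟩
      obtain ⟨ih1, ih2⟩ := ih (f ++ [r]) t (PySem.Set.add seen (pvSrc r)) h1' h2' h3 h4' h5' h6 h7' htl
      have hrF : r ∈ (tl.foldl pvStepA1 (f ++ [r], PySem.Set.add seen (pvSrc r))).1 := by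
        obtain ⟨⟨g, hFg⟩, _, _, _⟩ := pv_firstpass tl (f ++ [r]) _ h1' h2'
        rw [hFg]
        exact List.mem_append_left _ (List.mem_append_right _ (List.mem_singleton_self _))
      have hIn : pvInDicts ((tl.foldl pvStepA1 (f ++ [r], PySem.Set.add seen (pvSrc r))).1 ++ t) r = true := by
        rw [pvInDicts_append, pvInDicts_of_mem hrF]; rfl
      have hA2 : pvStepA2 R.length ((tl.foldl pvStepA1 (f ++ [r], PySem.Set.add seen (pvSrc r))).1 ++ t) r =
          (tl.foldl pvStepA1 (f ++ [r], PySem.Set.add seen (pvSrc r))).1 ++ t := by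
        simp [pvStepA2, hIn]
      constructor
      · simp only [List.foldl_cons, hA1, hB]; exact ih1
      · simp only [List.foldl_cons, hA1, hB, hA2]; exact ih2

-- ===== VERDICT (by name: the statement is the Claim_ definition above) =====
theorem ensure_result_diversity_py_spec : Claim_equal_ensure_result_diversity_py := by
  intro results _
  unfold Spec_ensure_result_diversity_py ensure_result_diversity_py ensure_result_diversity_py_alt
  have h := pv_main results results [] [] PySem.Set.empty
    (by simp [PySem.Set.empty]) (by simp) (by simp) (by simp) (by simp) (by simp) (by simp)
    (fun a ha => ha)
  obtain ⟨h1, h2⟩ := h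
  rw [List.append_nil] at h2
  refine h2.trans ?_
  show _ = (List.foldl pvStepB (PySem.Set.empty, [], []) results).2.1 ++ (List.foldl pvStepB (PySem.Set.empty, [], []) results).2.2
  rw [h1]
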